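-- pv_equiv track=rewrite | github.com/tejveersa/python | Notes/DictionariesNotes.py | gradeCounts
-- ===== SOURCE A (Python) =====
-- def gradeCounts(lst):
--     count = {}
--     for x in lst:
--         if x not in count:
--             count[x] = 1
--         else:
--             count[x] += 1
--     return count
-- ===== SOURCE B (Python) =====
-- def gradeCounts(lst):
--     return {x: lst.count(x) for x in dict.fromkeys(lst)}
-- ===== Notes on version B (the rewrite author's own statement) =====
-- stated objective: alternative
-- what changed: Replaces the single accumulating dict pass with an ordered dedup of the keys followed by a per-key list.count rescan (dict comprehension).
import Mathlib
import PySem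

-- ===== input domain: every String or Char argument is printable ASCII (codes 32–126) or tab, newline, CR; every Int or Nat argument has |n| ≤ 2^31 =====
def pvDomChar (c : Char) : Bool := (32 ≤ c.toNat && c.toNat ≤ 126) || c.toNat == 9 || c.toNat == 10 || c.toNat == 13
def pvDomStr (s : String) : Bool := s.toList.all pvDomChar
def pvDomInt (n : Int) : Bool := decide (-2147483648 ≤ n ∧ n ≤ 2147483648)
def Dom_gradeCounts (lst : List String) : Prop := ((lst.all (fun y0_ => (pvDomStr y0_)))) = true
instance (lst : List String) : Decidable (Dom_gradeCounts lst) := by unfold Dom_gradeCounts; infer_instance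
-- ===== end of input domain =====

-- B replaces A's single accumulating dict pass by an ordered dedup of the keys plus a per-key list.count rescan (alternative decomposition, not faster).

-- ===== PORT A =====
def gradeCounts (lst : List String) : List (String × Int) :=
  (lst.foldl (fun (count : PySem.Dict String Int) x =>
      if count.contains x = false then count.insert x 1
      else count.insert x (count.getD x 0 + 1))
    PySem.Dict.empty).items

-- ===== PORT B =====
def gradeCounts_alt (lst : List String) : List (String × Int) :=
  (PySem.Set.ofList lst).map (fun x => (x, (lst.count x : Int)))

-- ===== PRECONDITION & SPEC =====
def Spec_gradeCounts (lst : List String) (out : List (String × Int)) : Prop := out = gradeCounts_alt lst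
instance (lst : List String) (out : List (String × Int)) : Decidable (Spec_gradeCounts lst out) := by unfold Spec_gradeCounts; infer_instance

-- ===== CLAIM (what is proved, stated in full; the proofs are below) =====
def Claim_equal_gradeCounts : Prop := ∀ (lst : List String), Dom_gradeCounts lst → Spec_gradeCounts lst (gradeCounts lst)

-- ===== LEMMAS AND PROOFS =====

-- A's branching fold is the standard counter fold: in the not-contains branch getD is 0.
theorem gradeCounts_fold_eq_counter (lst : List String) :
    lst.foldl (fun (count : PySem.Dict String Int) x =>
      if count.contains x = false then count.insert x 1
      else count.insert x (count.getD x 0 + 1)) PySem.Dict.empty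
    = PySem.Dict.counter lst := by
  rw [← PySem.Dict.foldl_insert_getD_add_one_eq_counter]
  congr 1
  funext d x
  by_cases h : d.contains x = false
  · rw [PySem.Dict.getD_of_not_contains (h := h)]
    simp [h]
  · simp [h]

-- ===== VERDICT (by name: the statement is the Claim_ definition above) =====
theorem gradeCounts_spec : Claim_equal_gradeCounts := by
  intro lst _
  show gradeCounts lst = gradeCounts_alt lst
  unfold gradeCounts gradeCounts_alt
  rw [gradeCounts_fold_eq_counter, PySem.Dict.items_counter]
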